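-- pv_equiv track=rewrite | github.com/techccorp/blackboxai-1741347920779 | blackboxai-1741347920779/routes/onboarding/companyOnboarding_routes.py | validate_acn
-- ===== SOURCE A (Python) =====
-- def validate_acn(acn):
--     """
--     Validate the Australian Company Number (ACN).
--     A valid ACN should contain exactly 9 digits (ignoring spaces and punctuation).
--     """
--     acn_digits = ''.join(filter(str.isdigit, acn))
--     if len(acn_digits) != 9:
--         return False
--
--     # Apply ACN checksum validation
--     weights = [8, 7, 6, 5, 4, 3, 2, 1]
--     digits = [int(digit) for digit in acn_digits[:-1]]
--     weighted_sum = sum(w * d for w, d in zip(weights, digits))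
--     remainder = weighted_sum % 10
--     check_digit = 10 - remainder if remainder else 0
--
--     return check_digit == int(acn_digits[-1])
-- ===== SOURCE B (Python) =====
-- def validate_acn(acn):
--     """ACN check via nested running sums: weights 8..1 arise as repeated prefix sums,
--     so no weight table is needed."""
--     ds = [ord(c) - 48 for c in acn if c.isdigit()]
--     if len(ds) != 9:
--         return False
--     s = t = 0
--     for d in ds[:8]:
--         s += d
--         t += s
--     return (t + ds[8]) % 10 == 0
-- ===== Notes on version B (the rewrite author's own statement) =====
-- stated objective: alternative
-- what changed: B discards the weight table and the separate check-digit computation: since weights 8..1 are exactly how often each digit occurs in the prefix sums P_1..P_8, it accumulates two nested running sums (s += d; t += s) over the first eight digits in one pass and tests (t + last digit) % 10 == 0.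
import Mathlib
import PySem

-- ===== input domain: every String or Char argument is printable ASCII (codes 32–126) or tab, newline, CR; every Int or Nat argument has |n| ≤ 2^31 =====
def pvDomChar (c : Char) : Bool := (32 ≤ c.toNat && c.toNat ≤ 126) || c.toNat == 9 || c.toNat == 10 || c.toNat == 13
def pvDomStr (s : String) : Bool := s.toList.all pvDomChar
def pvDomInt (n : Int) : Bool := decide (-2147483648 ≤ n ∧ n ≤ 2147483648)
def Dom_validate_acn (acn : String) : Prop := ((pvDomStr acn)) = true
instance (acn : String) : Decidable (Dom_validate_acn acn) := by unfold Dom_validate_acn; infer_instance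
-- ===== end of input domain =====

-- B replaces A's weight table and check-digit branch by two nested running sums over the
-- first eight digits (prefix-sum identity) and a single mod-10 test (objective: alternative).

-- ===== PORT A =====
-- int(c) for a digit character c is its code point minus 48 (exact: the list is filtered by isdigit)
def validate_acn (acn : String) : Bool :=
  let acn_digits : List Char := acn.toList.filter PySem.Chars.isdigit
  if acn_digits.length ≠ 9 then false
  else
    let weights : List Int := [8, 7, 6, 5, 4, 3, 2, 1]
    let digits : List Int :=
      (PySem.List.slice acn_digits none (some (-1))).map (fun c => (c.toNat : Int) - 48)
    let weighted_sum : Int := ((weights.zip digits).map (fun p => p.1 * p.2)).sum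
    let remainder : Int := PySem.Int.mod weighted_sum 10
    let check_digit : Int := if remainder ≠ 0 then 10 - remainder else 0
    -- acn_digits[-1] is in range (length = 9), so pyGet? is some; getD 0 is never the default
    check_digit == ((PySem.List.pyGet? acn_digits (-1)).map (fun c => (c.toNat : Int) - 48)).getD 0

-- ===== PORT B =====
def validate_acn_alt (acn : String) : Bool :=
  let ds : List Int :=
    acn.toList.filterMap (fun c => if PySem.Chars.isdigit c then some ((c.toNat : Int) - 48) else none)
  if ds.length ≠ 9 then false
  else
    let st : Int × Int := (ds.take 8).foldl (fun p d => (p.1 + d, p.2 + (p.1 + d))) (0, 0)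
    -- ds[8] is in range (length = 9), so pyGet? is some; getD 0 is never the default
    PySem.Int.mod (st.2 + ((PySem.List.pyGet? ds 8).getD 0)) 10 == 0

-- ===== PRECONDITION & SPEC =====
def Spec_validate_acn (acn : String) (out : Bool) : Prop := out = validate_acn_alt acn
instance (acn : String) (out : Bool) : Decidable (Spec_validate_acn acn out) := by unfold Spec_validate_acn; infer_instance

-- ===== CLAIM (what is proved, stated in full; the proofs are below) =====
def Claim_equal_validate_acn : Prop := ∀ (acn : String), Dom_validate_acn acn → Spec_validate_acn acn (validate_acn acn)

-- ===== LEMMAS AND PROOFS =====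

theorem filterMap_if_eq_map_filter (l : List Char) :
    l.filterMap (fun c => if PySem.Chars.isdigit c then some ((c.toNat : Int) - 48) else none)
      = (l.filter PySem.Chars.isdigit).map (fun c => (c.toNat : Int) - 48) := by
  induction l with
  | nil => rfl
  | cons a l ih => by_cases h : PySem.Chars.isdigit a <;> simp [h, ih]

theorem digit_val_bounds (c : Char) (h : PySem.Chars.isdigit c = true) :
    0 ≤ (c.toNat : Int) - 48 ∧ (c.toNat : Int) - 48 ≤ 9 := by
  simp only [PySem.Chars.isdigit, Bool.and_eq_true, decide_eq_true_eq, Char.le_def,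
    UInt32.le_iff_toNat_le] at h
  have h0 : ('0' : Char).val.toNat = 48 := rfl
  have h9 : ('9' : Char).val.toNat = 57 := rfl
  simp only [Char.toNat] at *
  omega

-- ===== VERDICT (by name: the statement is the Claim_ definition above) =====
theorem validate_acn_spec : Claim_equal_validate_acn := by
  intro acn _
  unfold Spec_validate_acn validate_acn validate_acn_alt
  rw [filterMap_if_eq_map_filter]
  set l := acn.toList.filter PySem.Chars.isdigit with hl
  by_cases h9 : l.length = 9
  · have hall : ∀ c ∈ l, PySem.Chars.isdigit c = true := by
      intro c hc; exact (List.mem_filter.mp hc).2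
    match l, h9 with
    | [c0, c1, c2, c3, c4, c5, c6, c7, c8], _ =>
      have b0 := digit_val_bounds c0 (hall c0 (by simp))
      have b1 := digit_val_bounds c1 (hall c1 (by simp))
      have b2 := digit_val_bounds c2 (hall c2 (by simp))
      have b3 := digit_val_bounds c3 (hall c3 (by simp))
      have b4 := digit_val_bounds c4 (hall c4 (by simp))
      have b5 := digit_val_bounds c5 (hall c5 (by simp))
      have b6 := digit_val_bounds c6 (hall c6 (by simp))
      have b7 := digit_val_bounds c7 (hall c7 (by simp))
      have b8 := digit_val_bounds c8 (hall c8 (by simp))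
      simp [PySem.List.slice_to_neg_one, List.dropLast, List.foldl,
        PySem.List.pyGet?, PySem.List.pyIdx?]
      split_ifs with hr
      · constructor <;> intro h <;> omega
      · constructor <;> intro h <;> omega
  · simp [h9]
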